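-- pv_equiv track=rewrite | github.com/ConnectBox/wifi-configurator | wifi_configurator/scan.py | get_country_rules_block
-- ===== SOURCE A (Python) =====
-- def get_country_rules_block(country_code, lines):
--     """Extract the lines belonging to a single country's entry in regdbdump output.
--
--     regdbdump output groups rules by country; each country block starts with a
--     'country XX:' header and ends at the next blank line.  This function
--     returns just the lines for the requested country_code, including the header.
--
--     Parameters
--     ----------
--     country_code : str
--         Two-letter ISO country code to find (e.g. 'US').
--     lines : list of str
--         All lines from regdbdump stdout.
--
--     Returns
--     -------
--     list of str
--         Lines of the matching country block, or [] if not found.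
--     """
--     in_country_block = False
--     country_lines = []
--     for line in lines:
--         if in_country_block:
--             if line.strip():
--                 country_lines.append(line)
--                 continue
--             else:
--                 # We're at the end of the country block
--                 return country_lines
--         elif (not (line.find(country_code) >=0)):
--             continue
--         in_country_block = True
--         country_lines.append(line)
--         continue
--     return country_lines
-- ===== SOURCE B (Python) =====
-- def get_country_rules_block(country_code, lines):
--     """Two-phase: locate the header line, then slice off the block up to the
--     first blank line (no state flag)."""
--     i = next((k for k, l in enumerate(lines) if country_code in l), None)
--     if i is None:
--         return []
--     rest = lines[i + 1:]
--     j = next((k for k, l in enumerate(rest) if not l.strip()), len(rest))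
--     return [lines[i]] + rest[:j]
-- ===== Notes on version B (the rewrite author's own statement) =====
-- stated objective: simpler
-- what changed: Replaces the one-pass state-machine loop (in_country_block flag plus early return) by a two-phase decomposition: find the index of the first line containing country_code, then slice the following lines up to the first blank line.
import Mathlib
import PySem

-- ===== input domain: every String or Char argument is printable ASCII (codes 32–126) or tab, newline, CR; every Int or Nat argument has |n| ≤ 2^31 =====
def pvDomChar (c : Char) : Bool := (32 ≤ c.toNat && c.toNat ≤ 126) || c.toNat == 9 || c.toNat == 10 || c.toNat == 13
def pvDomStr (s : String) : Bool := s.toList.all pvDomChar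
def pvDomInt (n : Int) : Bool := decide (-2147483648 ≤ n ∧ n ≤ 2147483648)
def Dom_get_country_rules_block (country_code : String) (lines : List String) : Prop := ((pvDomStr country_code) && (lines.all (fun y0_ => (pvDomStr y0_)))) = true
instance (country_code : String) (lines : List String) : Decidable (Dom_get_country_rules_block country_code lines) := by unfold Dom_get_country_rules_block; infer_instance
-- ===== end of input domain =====

-- B replaces A's state-machine loop by a two-phase find-header-then-slice decomposition (objective: simpler).

-- ===== PORT A =====
-- state-machine loop: (remaining lines, in_country_block flag, accumulated country_lines)
def pvGoA (country_code : String) : List String → Bool → List String → List String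
  | [], _, acc => acc
  | l :: ls, true, acc =>
      if PySem.Str.strip l ≠ "" then pvGoA country_code ls true (acc ++ [l])
      else acc                                  -- early `return country_lines`
  | l :: ls, false, acc =>
      if 0 ≤ PySem.Str.find l country_code then pvGoA country_code ls true (acc ++ [l])
      else pvGoA country_code ls false acc      -- `continue`

def get_country_rules_block (country_code : String) (lines : List String) : List String :=
  pvGoA country_code lines false []

-- ===== PORT B =====
-- j = next((k for k, l in enumerate(rest) if not l.strip()), len(rest)) of Source B
def pvBlk (ls : List String) : Nat :=
  match ls.findIdx? (fun l => PySem.Str.strip l == "") with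
  | none => ls.length
  | some j => j

def get_country_rules_block_alt (country_code : String) (lines : List String) : List String :=
  match lines.findIdx? (fun l => PySem.Str.isIn country_code l) with
  | none => []
  | some i =>
      let rest := PySem.List.slice lines (some ((i : Int) + 1)) none
      [lines.getD i ""] ++ rest.take (pvBlk rest)

-- ===== PRECONDITION & SPEC =====
def Spec_get_country_rules_block (country_code : String) (lines : List String) (out : List String) : Prop := out = get_country_rules_block_alt country_code lines
instance (country_code : String) (lines : List String) (out : List String) : Decidable (Spec_get_country_rules_block country_code lines out) := by unfold Spec_get_country_rules_block; infer_instance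

-- ===== CLAIM (what is proved, stated in full; the proofs are below) =====
def Claim_equal_get_country_rules_block : Prop := ∀ (country_code : String) (lines : List String), Dom_get_country_rules_block country_code lines → Spec_get_country_rules_block country_code lines (get_country_rules_block country_code lines)

-- ===== LEMMAS AND PROOFS =====

theorem pvBlk_cons_blank (l : String) (ls : List String) (h : PySem.Str.strip l = "") :
    pvBlk (l :: ls) = 0 := by
  simp [pvBlk, List.findIdx?_cons, h]

theorem pvBlk_cons_nonblank (l : String) (ls : List String) (h : ¬ PySem.Str.strip l = "") :
    pvBlk (l :: ls) = pvBlk ls + 1 := by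
  simp only [pvBlk, List.findIdx?_cons]
  cases h' : ls.findIdx? (fun l => PySem.Str.strip l == "") <;> simp [h]

-- once the flag is set, A collects exactly the prefix up to the first blank line
theorem pvGoA_true (country_code : String) (ls acc : List String) :
    pvGoA country_code ls true acc = acc ++ ls.take (pvBlk ls) := by
  induction ls generalizing acc with
  | nil => simp [pvGoA]
  | cons l ls ih =>
    by_cases h : PySem.Str.strip l = ""
    · simp [pvGoA, h, pvBlk_cons_blank l ls h]
    · simp [pvGoA, h, pvBlk_cons_nonblank l ls h, ih]

-- substring test of A (`find ≥ 0`) agrees with the one of B (`in`)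
theorem pvFind_isIn (sub s : List Char) :
    (0 ≤ PySem.Chars.find s sub) ↔ PySem.Chars.isIn sub s = true := by
  rw [PySem.Chars.find_nonneg_iff, PySem.Chars.isIn_iff_infix]

theorem pvSlice_drop (xs : List String) (n : Nat) :
    PySem.List.slice xs (some ((n : Int))) none = xs.drop n :=
  PySem.List.slice_from_natCast xs n

theorem pvGoA_false (country_code : String) (ls : List String) :
    pvGoA country_code ls false [] = get_country_rules_block_alt country_code ls := by
  induction ls with
  | nil => simp [pvGoA, get_country_rules_block_alt]
  | cons l ls ih =>
    by_cases h : PySem.Chars.isIn country_code.toList l.toList = true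
    · have hf : 0 ≤ PySem.Chars.find l.toList country_code.toList :=
        (pvFind_isIn country_code.toList l.toList).mpr h
      unfold get_country_rules_block_alt
      simp only [List.findIdx?_cons, PySem.Str.isIn_eq, h, if_pos]
      rw [show ((0 : Nat) : Int) + 1 = ((1 : Nat) : Int) by norm_num, pvSlice_drop]
      simp only [pvGoA, PySem.Str.find_eq]
      rw [if_pos hf]
      simp [pvGoA_true]
    · have hf : ¬ 0 ≤ PySem.Chars.find l.toList country_code.toList := fun hc =>
        h ((pvFind_isIn country_code.toList l.toList).mp hc)
      rw [show pvGoA country_code (l :: ls) false [] = pvGoA country_code ls false [] by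
            simp only [pvGoA, PySem.Str.find_eq]; rw [if_neg hf], ih]
      unfold get_country_rules_block_alt
      simp only [List.findIdx?_cons, PySem.Str.isIn_eq, h, Bool.false_eq_true, if_false]
      cases hcase : ls.findIdx? (fun l => PySem.Chars.isIn country_code.toList l.toList) with
      | none => simp
      | some i =>
        simp only [Option.map_some]
        rw [show (((i + 1 : Nat)) : Int) + 1 = (((i + 2 : Nat)) : Int) by push_cast; ring,
            show ((i : Nat) : Int) + 1 = (((i + 1 : Nat)) : Int) by push_cast; ring,
            pvSlice_drop, pvSlice_drop]
        simp [List.drop_succ_cons]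

-- ===== VERDICT (by name: the statement is the Claim_ definition above) =====
theorem get_country_rules_block_spec : Claim_equal_get_country_rules_block := by
  intro country_code lines _
  unfold Spec_get_country_rules_block get_country_rules_block
  exact pvGoA_false country_code lines
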